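-- pv_equiv track=rewrite | github.com/andrewkimswe/programmers_2026 | 프로그래머스/2/150368. 이모티콘 할인행사/이모티콘 할인행사.py | solution
-- ===== SOURCE A (Python) =====
-- from itertools import product
--
-- def solution(users, emoticons):
--     answer = [0, 0]
--     discounts = [10, 20, 30, 40]
--
--     for p in product(discounts, repeat=len(emoticons)):
--         plus_user = 0
--         total_sales = 0
--
--         for user_rate, user_limit in users:
--             user_spent = 0
--             for i in range(len(emoticons)):
--                 if p[i] >= user_rate:
--                     user_spent += emoticons[i] * (100 - p[i]) // 100
--
--             if user_spent >= user_limit: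
--                 plus_user += 1
--             else:
--                 total_sales += user_spent
--
--         if plus_user > answer[0]:
--             answer = [plus_user, total_sales]
--         elif plus_user == answer[0] and total_sales > answer[1]:
--             answer[1] = total_sales
--
--     return answer
-- ===== SOURCE B (Python) =====
-- def solution(users, emoticons):
--     def step(best, score):
--         if score[0] > best[0] or (score[0] == best[0] and score[1] > best[1]):
--             return score
--         return best
--
--     def leaf(spent, best):
--         plus = 0
--         sales = 0
--         for s, (_, limit) in zip(spent, users):
--             if s >= limit:
--                 plus += 1
--             else:
--                 sales += s
--         return step(best, (plus, sales))
--
--     def rec(i, spent, best):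
--         if i == len(emoticons):
--             return leaf(spent, best)
--         price = emoticons[i]
--         for d in (10, 20, 30, 40):
--             delta = [price * (100 - d) // 100 if d >= rate else 0 for rate, _ in users]
--             best = rec(i + 1, [s + dv for s, dv in zip(spent, delta)], best)
--         return best
--
--     b = rec(0, [0] * len(users), (0, 0))
--     return [b[0], b[1]]
-- ===== Notes on version B (the rewrite author's own statement) =====
-- stated objective: alternative
-- what changed: Replaces the flat itertools.product loop that rescores every user from scratch per combination with a recursive DFS over the emoticons that threads a per-user running-spend list, so each leaf only classifies users against their limits.
import Mathlib
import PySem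

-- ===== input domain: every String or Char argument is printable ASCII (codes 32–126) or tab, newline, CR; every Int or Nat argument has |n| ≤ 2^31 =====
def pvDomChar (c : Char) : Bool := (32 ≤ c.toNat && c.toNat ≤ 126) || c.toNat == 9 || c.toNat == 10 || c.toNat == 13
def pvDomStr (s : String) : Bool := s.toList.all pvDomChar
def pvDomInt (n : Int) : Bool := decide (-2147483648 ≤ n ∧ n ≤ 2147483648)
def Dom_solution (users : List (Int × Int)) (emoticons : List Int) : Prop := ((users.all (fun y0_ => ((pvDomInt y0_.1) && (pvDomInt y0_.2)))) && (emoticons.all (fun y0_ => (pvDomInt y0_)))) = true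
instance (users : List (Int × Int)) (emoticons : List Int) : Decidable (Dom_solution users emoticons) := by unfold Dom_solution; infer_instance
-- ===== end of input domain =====

-- B replaces A's flat itertools.product enumeration by a DFS over the emoticons that
-- threads a per-user running-spend list, so each leaf only classifies users (alternative decomposition).

-- ===== PORT A =====
-- itertools.product([10,20,30,40], repeat=n), in Python's order (leftmost varies slowest)
def prodRep : Nat → List (List Int)
  | 0 => [[]]
  | n + 1 => [10, 20, 30, 40].flatMap (fun d => (prodRep n).map (fun t => d :: t))

-- A's inner index loop: one user's spend for combination p
def userSpentA (p es : List Int) (rate : Int) : Int :=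
  (List.range es.length).foldl (fun s i =>
    if p.getD i 0 ≥ rate then s + PySem.Int.floordiv (es.getD i 0 * (100 - p.getD i 0)) 100 else s) 0

-- A's per-combination user loop: (plus_user, total_sales)
def scoreA (users : List (Int × Int)) (p es : List Int) : Int × Int :=
  users.foldl (fun acc u =>
    let s := userSpentA p es u.1
    if s ≥ u.2 then (acc.1 + 1, acc.2) else (acc.1, acc.2 + s)) (0, 0)

-- A's answer update (the if / elif at the end of the loop body)
def stepA (ans sc : Int × Int) : Int × Int :=
  if sc.1 > ans.1 then sc else if sc.1 = ans.1 ∧ sc.2 > ans.2 then (ans.1, sc.2) else ans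

def solution (users : List (Int × Int)) (emoticons : List Int) : List Int :=
  let r := (prodRep emoticons.length).foldl (fun ans p => stepA ans (scoreA users p emoticons)) (0, 0)
  [r.1, r.2]

-- ===== PORT B =====
def stepB (best sc : Int × Int) : Int × Int :=
  if sc.1 > best.1 ∨ (sc.1 = best.1 ∧ sc.2 > best.2) then sc else best

def leafB (spent : List Int) (users : List (Int × Int)) (best : Int × Int) : Int × Int :=
  let sc := (spent.zip users).foldl
    (fun acc su => if su.1 ≥ su.2.2 then (acc.1 + 1, acc.2) else (acc.1, acc.2 + su.1)) (0, 0)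
  stepB best sc

def deltaB (users : List (Int × Int)) (price d : Int) : List Int :=
  users.map (fun u => if d ≥ u.1 then PySem.Int.floordiv (price * (100 - d)) 100 else 0)

def recB (users : List (Int × Int)) : List Int → List Int → Int × Int → Int × Int
  | [], spent, best => leafB spent users best
  | price :: rest, spent, best =>
      [10, 20, 30, 40].foldl
        (fun b d => recB users rest (spent.zipWith (· + ·) (deltaB users price d)) b) best

def solution_alt (users : List (Int × Int)) (emoticons : List Int) : List Int :=
  let b := recB users emoticons (users.map (fun _ => 0)) (0, 0)
  [b.1, b.2]

-- ===== PRECONDITION & SPEC =====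
def Spec_solution (users : List (Int × Int)) (emoticons : List Int) (out : List Int) : Prop := out = solution_alt users emoticons
instance (users : List (Int × Int)) (emoticons : List Int) (out : List Int) : Decidable (Spec_solution users emoticons out) := by unfold Spec_solution; infer_instance

-- ===== CLAIM (what is proved, stated in full; the proofs are below) =====
def Claim_equal_solution : Prop := ∀ (users : List (Int × Int)) (emoticons : List Int), Dom_solution users emoticons → Spec_solution users emoticons (solution users emoticons)

-- ===== LEMMAS AND PROOFS =====

-- one user's total contribution of combination p on emoticons es (proof-side abstraction)
def contribU : List Int → List Int → Int → Int
  | e :: es, d :: p, rate =>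
      (if d ≥ rate then PySem.Int.floordiv (e * (100 - d)) 100 else 0) + contribU es p rate
  | _, _, _ => 0

def contrib (users : List (Int × Int)) (es p : List Int) : List Int :=
  users.map (fun u => contribU es p u.1)

lemma contribU_nil (p : List Int) (rate : Int) : contribU [] p rate = 0 := by
  cases p <;> rfl

lemma zipWith_map_same {α : Type} (f g : α → Int) (l : List α) :
    List.zipWith (· + ·) (l.map f) (l.map g) = l.map (fun x => f x + g x) := by
  induction l with
  | nil => rfl
  | cons a t ih => simp [ih]

lemma zipWith_add_assoc : ∀ (a b c : List Int),
    List.zipWith (· + ·) a (List.zipWith (· + ·) b c)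
      = List.zipWith (· + ·) (List.zipWith (· + ·) a b) c := by
  intro a
  induction a with
  | nil => intro b c; rfl
  | cons x a ih =>
      intro b c
      cases b with
      | nil => rfl
      | cons y b =>
          cases c with
          | nil => rfl
          | cons z c => simp [ih]; ring

lemma zip_addZero : ∀ (spent : List Int) (users : List (Int × Int)),
    (List.zipWith (· + ·) spent (users.map (fun _ => (0 : Int)))).zip users = spent.zip users := by
  intro spent
  induction spent with
  | nil => intro users; rfl
  | cons s t ih =>
      intro users
      cases users with
      | nil => rfl
      | cons u us =>
          simp only [List.map_cons, List.zipWith_cons_cons, add_zero, List.zip_cons_cons]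
          rw [ih]

lemma foldl_flatMap {α β γ : Type} (l : List α) (f : α → List β) (g : γ → β → γ) :
    ∀ (init : γ), (l.flatMap f).foldl g init = l.foldl (fun b a => (f a).foldl g b) init := by
  induction l with
  | nil => intro init; rfl
  | cons x t ih => intro init; simp [List.foldl_append, ih]

lemma mem_prodRep_length : ∀ (n : Nat) (p : List Int), p ∈ prodRep n → p.length = n := by
  intro n
  induction n with
  | zero => intro p hp; simp [prodRep] at hp; simp [hp]
  | succ m ih =>
      intro p hp
      simp only [prodRep, List.mem_flatMap, List.mem_map] at hp
      obtain ⟨d, _, t, ht, rfl⟩ := hp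
      simp [ih t ht]

lemma userSpentA_aux (rate : Int) : ∀ (es p : List Int) (s : Int), p.length = es.length →
    (List.range es.length).foldl (fun s i =>
      if p.getD i 0 ≥ rate then s + PySem.Int.floordiv (es.getD i 0 * (100 - p.getD i 0)) 100 else s) s
    = s + contribU es p rate := by
  intro es
  induction es with
  | nil => intro p s h; simp [contribU_nil]
  | cons e es ih =>
      intro p s h
      cases p with
      | nil => simp at h
      | cons d p =>
          simp only [List.length_cons] at h ⊢
          rw [List.range_succ_eq_map]
          simp only [List.foldl_cons, List.foldl_map]
          have h' : p.length = es.length := by omega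
          rw [show (fun (s : Int) (i : Nat) =>
              if (d :: p).getD (Nat.succ i) 0 ≥ rate then
                s + PySem.Int.floordiv ((e :: es).getD (Nat.succ i) 0 * (100 - (d :: p).getD (Nat.succ i) 0)) 100
              else s)
            = (fun (s : Int) (i : Nat) =>
              if p.getD i 0 ≥ rate then s + PySem.Int.floordiv (es.getD i 0 * (100 - p.getD i 0)) 100 else s)
            from by funext s i; simp]
          rw [ih p _ h']
          simp only [List.getD_cons_zero, contribU]
          split <;> omega

lemma userSpentA_eq (es p : List Int) (rate : Int) (h : p.length = es.length) :
    userSpentA p es rate = contribU es p rate := by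
  have := userSpentA_aux rate es p 0 h
  simpa [userSpentA] using this

lemma zip_map_self {α β : Type} (f : α → β) (l : List α) :
    (l.map f).zip l = l.map (fun x => (f x, x)) := by
  induction l with
  | nil => rfl
  | cons a t ih => simp [ih]

lemma stepA_eq_stepB (ans sc : Int × Int) : stepA ans sc = stepB ans sc := by
  unfold stepA stepB
  by_cases h1 : sc.1 > ans.1
  · simp [h1]
  · by_cases h2 : sc.1 = ans.1 ∧ sc.2 > ans.2
    · simp only [if_neg h1, if_pos h2, if_pos (Or.inr h2)]
      exact Prod.ext h2.1.symm rfl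
    · have : ¬ (sc.1 > ans.1 ∨ sc.1 = ans.1 ∧ sc.2 > ans.2) := by tauto
      simp only [if_neg h1, if_neg h2, if_neg this]

lemma scoreA_eq_leaf (users : List (Int × Int)) (es p : List Int) (h : p.length = es.length) :
    leafB (contrib users es p) users = fun best => stepB best (scoreA users p es) := by
  funext best
  unfold leafB scoreA contrib
  rw [zip_map_self, List.foldl_map]
  dsimp only
  congr 1
  apply PySem.List.foldl_congr_mem
  intro acc u _
  rw [userSpentA_eq es p u.1 h]

lemma recB_eq (users : List (Int × Int)) : ∀ (es spent : List Int) (best : Int × Int),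
    recB users es spent best
      = (prodRep es.length).foldl
          (fun b p => leafB (spent.zipWith (· + ·) (contrib users es p)) users b) best := by
  intro es
  induction es with
  | nil =>
      intro spent best
      simp only [List.length_nil, prodRep, List.foldl_cons, List.foldl_nil, recB]
      unfold leafB
      rw [show contrib users [] [] = users.map (fun _ => (0:Int)) from by
        simp [contrib, contribU_nil]]
      rw [zip_addZero]
  | cons e es ih =>
      intro spent best
      simp only [List.length_cons, prodRep, recB]
      rw [foldl_flatMap]
      apply PySem.List.foldl_congr_mem
      intro b d _
      rw [ih, List.foldl_map]
      apply PySem.List.foldl_congr_mem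
      intro b' t _
      have hc : contrib users (e :: es) (d :: t)
          = List.zipWith (· + ·) (deltaB users e d) (contrib users es t) := by
        simp [contrib, deltaB, contribU]
      rw [hc, zipWith_add_assoc]

-- ===== VERDICT (by name: the statement is the Claim_ definition above) =====
theorem solution_spec : Claim_equal_solution := by
  intro users emoticons _
  unfold Spec_solution solution solution_alt
  rw [recB_eq]
  dsimp only
  have hfold : List.foldl (fun ans p => stepA ans (scoreA users p emoticons)) (0, 0) (prodRep emoticons.length)
      = List.foldl (fun b p =>
          leafB (List.zipWith (· + ·) (users.map (fun _ => (0:Int))) (contrib users emoticons p)) users b)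
          (0, 0) (prodRep emoticons.length) := by
    apply PySem.List.foldl_congr_mem
    intro b p hp
    have hl : p.length = emoticons.length := mem_prodRep_length _ p hp
    have h0 : List.zipWith (· + ·) (users.map (fun _ => (0:Int))) (contrib users emoticons p)
        = contrib users emoticons p := by
      unfold contrib
      rw [zipWith_map_same]
      simp
    rw [h0, scoreA_eq_leaf users emoticons p hl, stepA_eq_stepB]
  rw [hfold]
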